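-- pv_equiv track=rewrite | github.com/uwuChenry/CS1301 | practiceProblems.py | lunchSpots
-- ===== SOURCE A (Python) =====
-- def lunchSpots(d):
--     out = {}
--     for key, value in d.items():
--         for thing in value:
--             if thing not in out.keys():
--                 out[thing] = []
--             out[thing].append(key)
--     for a in out:
--         out[a].sort()
--     return out
-- ===== SOURCE B (Python) =====
-- def lunchSpots(d):
--     # Skeleton in first-appearance order, then fill by visiting keys in
--     # ascending order, so every value list comes out already sorted (no .sort()).
--     out = {}
--     for value in d.values():
--         for thing in value:
--             out.setdefault(thing, [])
--     for key in sorted(d):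
--         for thing in d[key]:
--             out[thing].append(key)
--     return out
-- ===== Notes on version B (the rewrite author's own statement) =====
-- stated objective: alternative
-- what changed: A builds value lists in dict-iteration order and sorts each one afterwards; B first lays out the inverted dict's keys (empty lists), then fills each list by visiting the outer keys in ascending order, so every list is produced already sorted and the per-key .sort() pass disappears.
import Mathlib
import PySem

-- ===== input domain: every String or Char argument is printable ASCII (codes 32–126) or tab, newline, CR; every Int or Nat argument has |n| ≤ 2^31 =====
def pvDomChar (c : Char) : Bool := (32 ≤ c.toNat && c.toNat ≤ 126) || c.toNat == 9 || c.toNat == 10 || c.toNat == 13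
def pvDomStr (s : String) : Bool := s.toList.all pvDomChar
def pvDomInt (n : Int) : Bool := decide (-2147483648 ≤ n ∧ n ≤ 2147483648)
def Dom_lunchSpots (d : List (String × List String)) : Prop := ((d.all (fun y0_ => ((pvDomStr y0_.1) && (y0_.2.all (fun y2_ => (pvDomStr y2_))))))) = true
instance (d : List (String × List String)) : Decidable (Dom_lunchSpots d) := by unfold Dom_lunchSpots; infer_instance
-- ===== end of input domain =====

-- B inverts the dict by laying out the inverted keys first and then filling each value
-- list while visiting the outer keys in ascending order, so every list is produced
-- already sorted and A's per-key .sort() pass disappears (alternative decomposition).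

-- ===== PORT A =====
def lunchSpots (d : List (String × List String)) : List (String × List String) :=
  let out : PySem.Dict String (List String) :=
    d.foldl (fun out kv =>
      kv.2.foldl (fun out thing =>
        let out1 := if out.contains thing then out else out.insert thing ([] : List String)
        out1.modify thing [] (fun l => l ++ [kv.1])) out) PySem.Dict.empty
  let out2 := out.keys.foldl
    (fun o a => o.modify a [] (fun l => PySem.List.sorted l (fun x => x) false)) out
  out2.items

-- ===== PORT B =====
def lunchSpots_alt (d : List (String × List String)) : List (String × List String) :=
  let dd := PySem.Dict.ofList d
  let out : PySem.Dict String (List String) :=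
    d.foldl (fun out kv =>
      kv.2.foldl (fun out thing => out.setdefault thing ([] : List String)) out) PySem.Dict.empty
  let out2 := (PySem.List.sorted dd.keys (fun x => x) false).foldl
    (fun o k => (dd.getD k []).foldl (fun o thing => o.modify thing [] (fun l => l ++ [k])) o) out
  out2.items

-- ===== PRECONDITION & SPEC =====
-- Pre_ excludes only association lists with duplicate keys: those represent no Python
-- dict at all (A's argument is a dict, whose keys are necessarily distinct).
def Pre_lunchSpots (d : List (String × List String)) : Prop := (d.map Prod.fst).Nodup
instance (d : List (String × List String)) : Decidable (Pre_lunchSpots d) := by unfold Pre_lunchSpots; infer_instance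
def pvWitness_lunchSpots : (List (String × List String)) :=
  [("b", ["x"]), ("a", ["x", "y", "x"]), ("c", [])]

def Spec_lunchSpots (d : List (String × List String)) (out : List (String × List String)) : Prop := out = lunchSpots_alt d
instance (d : List (String × List String)) (out : List (String × List String)) : Decidable (Spec_lunchSpots d out) := by unfold Spec_lunchSpots; infer_instance

-- ===== CLAIM (what is proved, stated in full; the proofs are below) =====
def Claim_equal_lunchSpots : Prop := ∀ (d : List (String × List String)), Dom_lunchSpots d → Pre_lunchSpots d → Spec_lunchSpots d (lunchSpots d)

-- ===== LEMMAS AND PROOFS =====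

-- the (thing, key) pairs A appends from, in A's visiting order
def pvPairs (d : List (String × List String)) : List (String × String) :=
  d.flatMap (fun kv => kv.2.map (fun t => (t, kv.1)))

-- all things of all value lists, in visiting order
def pvThings (d : List (String × List String)) : List String :=
  d.flatMap (fun kv => kv.2)

theorem pv_stepA_eq (o : PySem.Dict String (List String)) (t k : String) :
    (if o.contains t then o else o.insert t ([] : List String)).modify t []
        (fun l => l ++ [k]) =
      o.modify t [] (fun l => l ++ [k]) := by
  by_cases hc : o.contains t
  · simp [hc]
  · have hcf : o.contains t = false := by simpa using hc
    simp [hc, PySem.Dict.modify, PySem.Dict.getD_insert_self, PySem.Dict.insert_insert_self,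
      PySem.Dict.getD_of_not_contains o _ hcf]

theorem pv_getD_sortpass (L : List String) (hL : L.Nodup)
    (f : List String → List String) (o : PySem.Dict String (List String)) (c : String) :
    ((L.foldl (fun o a => o.modify a [] f) o).getD c []) =
      if c ∈ L then f (o.getD c []) else o.getD c [] := by
  induction L generalizing o with
  | nil => simp
  | cons a L ih =>
    rcases List.nodup_cons.mp hL with ⟨ha, hL'⟩
    rw [List.foldl_cons, ih hL', PySem.Dict.getD_modify]
    by_cases hca : c = a
    · subst hca; simp [ha]
    · simp [hca]

theorem pv_keys_foldl_setdefault (L : List String) (o : PySem.Dict String (List String)) :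
    ((L.foldl (fun o t => o.setdefault t ([] : List String)) o).keys) =
      PySem.Set.update o.keys L := by
  induction L generalizing o with
  | nil => simp [PySem.Set.update]
  | cons a L ih =>
    rw [List.foldl_cons, ih, PySem.Set.update_cons]
    congr 1
    rw [PySem.Dict.keys_setdefault, PySem.Set.add_eq_ite]
    by_cases h : o.contains a
    · simp [h, (PySem.Dict.contains_iff_mem_keys o a).mp h]
    · have : a ∉ o.keys := fun hm => h ((PySem.Dict.contains_iff_mem_keys o a).mpr hm)
      simp [h, this]

theorem pv_update_of_subset (s : PySem.Set String) (xs : List String)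
    (h : ∀ x ∈ xs, x ∈ s) : PySem.Set.update s xs = s := by
  induction xs generalizing s with
  | nil => simp [PySem.Set.update]
  | cons x xs ih =>
    rw [PySem.Set.update_cons, PySem.Set.add_of_mem (show x ∈ s from h x (by simp))]
    exact ih s (fun y hy => h y (by simp [hy]))

theorem pv_block (v : List String) (k c : String) :
    (((v.map (fun t => (t, k))).filter (fun p => p.1 == c)).map Prod.snd) =
      List.replicate (v.count c) k := by
  induction v with
  | nil => simp
  | cons x v ih =>
    by_cases hx : x = c
    · subst hx; simp [ih, List.replicate_succ]
    · simp [hx, ih]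

theorem pv_pairwise_flatMap_replicate (L : List String) (n : String → Nat)
    (h : L.Pairwise (· ≤ ·)) :
    (L.flatMap (fun k => List.replicate (n k) k)).Pairwise (· ≤ ·) := by
  induction L with
  | nil => simp
  | cons a L ih =>
    rcases List.pairwise_cons.mp h with ⟨hab, hL⟩
    rw [List.flatMap_cons]
    rw [List.pairwise_append]
    refine ⟨List.pairwise_replicate.mpr (Or.inr (le_refl a)), ih hL, ?_⟩
    intro x hx y hy
    rcases List.mem_flatMap.mp hy with ⟨b, hb, hyb⟩
    rw [List.eq_of_mem_replicate hx, List.eq_of_mem_replicate hyb]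
    exact hab b hb

theorem pv_items_ofList (d : List (String × List String)) (h : (d.map Prod.fst).Nodup) :
    (PySem.Dict.ofList d).items = d := by
  have := PySem.Dict.items_foldl_insert_fresh d Prod.fst Prod.snd PySem.Dict.empty
    (fun a _ => PySem.Dict.contains_empty (κ := String) (ν := List String) a.1) h
  simpa using this

theorem pv_getD_ofList (d : List (String × List String)) (h : (d.map Prod.fst).Nodup)
    {kv : String × List String} (hkv : kv ∈ d) :
    (PySem.Dict.ofList d).getD kv.1 [] = kv.2 := by
  have hk : (PySem.Dict.ofList d).keys.Nodup := by
    simpa [PySem.Dict.keys, pv_items_ofList d h] using h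
  have : (PySem.Dict.ofList d).get? kv.1 = some kv.2 := by
    rw [PySem.Dict.get?_eq_some_iff_mem_items _ _ _ hk, pv_items_ofList d h]
    exact hkv
  exact PySem.Dict.getD_of_get?_eq_some _ _ this

theorem pv_getD_foldl_setdefault (L : List String) (o : PySem.Dict String (List String)) (c : String) :
    ((L.foldl (fun o t => o.setdefault t ([] : List String)) o).getD c []) = o.getD c [] := by
  induction L generalizing o with
  | nil => rfl
  | cons t L ih =>
    rw [List.foldl_cons, ih]
    by_cases hct : c = t
    · subst hct; exact PySem.Dict.getD_setdefault_self o c [] []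
    · rw [PySem.Dict.getD_eq_get?_getD, PySem.Dict.get?_setdefault_of_ne o [] hct,
        PySem.Dict.getD_eq_get?_getD]

-- map fst of pvPairs is pvThings
theorem pv_map_fst_pairs (d : List (String × List String)) :
    (pvPairs d).map Prod.fst = pvThings d := by
  simp only [pvPairs, pvThings, List.map_flatMap]
  refine List.flatMap_congr (fun kv _ => ?_)
  simp [Function.comp_def]

theorem pv_valA (d : List (String × List String)) (c : String) :
    ((pvPairs d).filter (fun p => p.1 == c)).map Prod.snd =
      d.flatMap (fun kv => List.replicate (kv.2.count c) kv.1) := by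
  simp only [pvPairs, List.filter_flatMap, List.map_flatMap]
  exact List.flatMap_congr (fun kv _ => pv_block kv.2 kv.1 c)

theorem pv_update_nil_ofList (l : List String) :
    PySem.Set.update ([] : PySem.Set String) l = PySem.Set.ofList l := by
  rw [PySem.Set.update_eq_foldl, PySem.Set.ofList_eq_foldl]

theorem pv_A (d : List (String × List String)) :
    lunchSpots d = (PySem.Set.ofList (pvThings d)).map
      (fun c => (c, PySem.List.sorted (((pvPairs d).filter (fun p => p.1 == c)).map Prod.snd)
        (fun x => x) false)) := by
  unfold lunchSpots
  simp only []
  have h1 : (d.foldl (fun out kv => kv.2.foldl (fun out thing =>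
        (if out.contains thing then out else out.insert thing ([] : List String)).modify thing []
          (fun l => l ++ [kv.1])) out) PySem.Dict.empty)
      = (pvPairs d).foldl (fun o p => o.modify p.1 [] (fun l => l ++ [p.2])) PySem.Dict.empty := by
    rw [pvPairs, List.foldl_flatMap]
    simp only [List.foldl_map, pv_stepA_eq]
  rw [h1]
  set out1 := (pvPairs d).foldl (fun o p => o.modify p.1 [] (fun l => l ++ [p.2])) PySem.Dict.empty with hout1
  have hkeys1 : out1.keys = PySem.Set.ofList (pvThings d) := by
    have := PySem.Dict.keys_foldl_modify_key (pvPairs d) Prod.fst ([] : List String)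
      (fun _ p => fun l => l ++ [p.2]) PySem.Dict.empty
    simpa [hout1, PySem.Dict.keys_empty, pv_map_fst_pairs, pv_update_nil_ofList] using this
  have hnodup1 : out1.keys.Nodup := by rw [hkeys1]; exact PySem.Set.nodup_ofList _
  have hget1 : ∀ c, out1.getD c [] = ((pvPairs d).filter (fun p => p.1 == c)).map Prod.snd := by
    intro c
    rw [hout1, PySem.Dict.getD_foldl_modify_append]
    simp [PySem.Dict.getD_empty]
  set out2 := out1.keys.foldl
    (fun o a => o.modify a [] (fun l => PySem.List.sorted l (fun x => x) false)) out1 with hout2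
  have hkeys2 : out2.keys = out1.keys := by
    have := PySem.Dict.keys_foldl_modify (out1.keys) ([] : List String)
      (fun _ _ => fun l => PySem.List.sorted l (fun x => x) false) out1
    rw [hout2]
    simp only at this
    rw [this]
    exact pv_update_of_subset _ _ (fun x hx => hx)
  have hnodup2 : out2.keys.Nodup := by rw [hkeys2]; exact hnodup1
  have hget2 : ∀ c ∈ out1.keys, out2.getD c [] =
      PySem.List.sorted (((pvPairs d).filter (fun p => p.1 == c)).map Prod.snd) (fun x => x) false := by
    intro c hc
    rw [hout2, pv_getD_sortpass _ hnodup1]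
    simp [hc, hget1 c]
  rw [PySem.Dict.items_eq_map_keys out2 hnodup2 []]
  rw [hkeys2, hkeys1]
  apply List.map_congr_left
  intro c hc
  rw [hget2 c (hkeys1 ▸ hc)]

theorem pv_B (d : List (String × List String)) (h : (d.map Prod.fst).Nodup) :
    lunchSpots_alt d = (PySem.Set.ofList (pvThings d)).map
      (fun c => (c, (PySem.List.sorted (d.map Prod.fst) (fun x => x) false).flatMap
          (fun k => List.replicate (((PySem.Dict.ofList d).getD k []).count c) k))) := by
  unfold lunchSpots_alt
  simp only []
  have hkofl : (PySem.Dict.ofList d).keys = d.map Prod.fst := by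
    show (PySem.Dict.ofList d).items.map Prod.fst = d.map Prod.fst
    rw [pv_items_ofList d h]
  rw [hkofl]
  set dd := PySem.Dict.ofList d with hdd
  set sk := PySem.List.sorted (d.map Prod.fst) (fun x => x) false with hsk
  -- skeleton pass as a fold over pvThings
  have h0 : (d.foldl (fun out kv => kv.2.foldl (fun out thing =>
        out.setdefault thing ([] : List String)) out) PySem.Dict.empty)
      = (pvThings d).foldl (fun o t => o.setdefault t ([] : List String)) PySem.Dict.empty := by
    rw [pvThings, List.foldl_flatMap]
  rw [h0]
  set out1 := (pvThings d).foldl (fun o t => o.setdefault t ([] : List String)) PySem.Dict.empty with hout1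
  have hkeys1 : out1.keys = PySem.Set.ofList (pvThings d) := by
    rw [hout1, pv_keys_foldl_setdefault, PySem.Dict.keys_empty, pv_update_nil_ofList]
  have hget1 : ∀ c, out1.getD c [] = [] := by
    intro c; rw [hout1, pv_getD_foldl_setdefault, PySem.Dict.getD_empty]
  -- fill pass as a fold over (thing, key) pairs
  set qs := sk.flatMap (fun k => (dd.getD k []).map (fun t => (t, k))) with hqs
  have h2 : (sk.foldl (fun o k => (dd.getD k []).foldl
        (fun o thing => o.modify thing [] (fun l => l ++ [k])) o) out1)
      = qs.foldl (fun o p => o.modify p.1 [] (fun l => l ++ [p.2])) out1 := by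
    rw [hqs, List.foldl_flatMap]
    simp only [List.foldl_map]
  rw [h2]
  set out2 := qs.foldl (fun o p => o.modify p.1 [] (fun l => l ++ [p.2])) out1 with hout2
  -- every filled key is already in the skeleton
  have hsub : ∀ x ∈ qs.map Prod.fst, x ∈ out1.keys := by
    intro x hx
    rw [hkeys1]
    rcases List.mem_map.mp hx with ⟨p, hp, hpx⟩
    rw [hqs] at hp
    rcases List.mem_flatMap.mp hp with ⟨k, hk, hpk⟩
    rcases List.mem_map.mp hpk with ⟨t, ht, hpt⟩
    have hkmem : k ∈ d.map Prod.fst := (PySem.List.mem_sorted _ _ _ _).mp hk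
    rcases List.mem_map.mp hkmem with ⟨kv, hkv, hkk⟩
    have hval : dd.getD k [] = kv.2 := by rw [hdd, ← hkk]; exact pv_getD_ofList d h hkv
    rw [hval] at ht
    apply (PySem.Set.mem_ofList _ _).mpr
    rw [pvThings]
    apply List.mem_flatMap.mpr ⟨kv, hkv, ?_⟩
    rw [← hpx, ← hpt]
    exact ht
  have hkeys2 : out2.keys = out1.keys := by
    have := PySem.Dict.keys_foldl_modify_key qs Prod.fst ([] : List String)
      (fun _ p => fun l => l ++ [p.2]) out1
    rw [hout2]
    simp only at this
    rw [this]
    exact pv_update_of_subset _ _ hsub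
  have hnodup2 : out2.keys.Nodup := by
    rw [hkeys2, hkeys1]; exact PySem.Set.nodup_ofList _
  have hget2 : ∀ c, out2.getD c [] = (qs.filter (fun p => p.1 == c)).map Prod.snd := by
    intro c
    rw [hout2, PySem.Dict.getD_foldl_modify_append, hget1]
    simp
  rw [PySem.Dict.items_eq_map_keys out2 hnodup2 []]
  rw [hkeys2, hkeys1]
  apply List.map_congr_left
  intro c hc
  rw [hget2 c, hqs]
  simp only [List.filter_flatMap, List.map_flatMap]
  exact congrArg (fun v => (c, v)) (List.flatMap_congr (fun k _ => pv_block (dd.getD k []) k c))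

theorem pv_values_eq (d : List (String × List String)) (h : (d.map Prod.fst).Nodup) (c : String) :
    PySem.List.sorted (((pvPairs d).filter (fun p => p.1 == c)).map Prod.snd) (fun x => x) false =
      (PySem.List.sorted (d.map Prod.fst) (fun x => x) false).flatMap
        (fun k => List.replicate (((PySem.Dict.ofList d).getD k []).count c) k) := by
  rw [pv_valA]
  set g := fun k => List.replicate (((PySem.Dict.ofList d).getD k []).count c) k with hg
  apply PySem.List.sorted_id_eq_of_perm_of_pairwise
  · -- permutation
    have hsk : (PySem.List.sorted (d.map Prod.fst) (fun x => x) false).Perm (d.map Prod.fst) :=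
      PySem.List.sorted_perm _ _ false
    have h2 := List.Perm.flatMap_right g hsk
    have h3 : (d.map Prod.fst).flatMap g = d.flatMap (fun kv => List.replicate (kv.2.count c) kv.1) := by
      rw [List.flatMap_map]
      refine List.flatMap_congr (fun kv hkv => ?_)
      show g kv.1 = _
      rw [hg]
      simp only [pv_getD_ofList d h hkv]
    rw [h3] at h2
    exact h2
  · -- sortedness
    have := pv_pairwise_flatMap_replicate (PySem.List.sorted (d.map Prod.fst) (fun x => x) false)
      (fun k => ((PySem.Dict.ofList d).getD k []).count c)
      (by simpa using PySem.List.sorted_pairwise (d.map Prod.fst) (fun x => x))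
    simpa using this


-- A = B, pointwise assembly of the three characterisations above
theorem pv_final (d : List (String × List String)) (h : (d.map Prod.fst).Nodup) :
    lunchSpots d = lunchSpots_alt d := by
  rw [pv_A d, pv_B d h]
  apply List.map_congr_left
  intro c _
  rw [pv_values_eq d h c]

-- ===== VERDICT (by name: the statement is the Claim_ definition above) =====
theorem lunchSpots_spec : Claim_equal_lunchSpots := by
  intro d _ hpre
  exact pv_final d hpre
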